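-- pv_equiv track=rewrite | github.com/VinylStage/horror-story-generator | research_api/services/research_service.py | parse_cli_output
-- ===== SOURCE A (Python) =====
-- from typing import Dict, Any, List, Optional
--
-- def parse_cli_output(output: str) -> Dict[str, Any]:
--     """
--     Parse CLI output to extract card info.
--
--     Expected format:
--         Card ID: RC-YYYYMMDD-HHMMSS
--         Title: Some Title
--         Quality: good
--         JSON: /path/to/file.json
--         Markdown: /path/to/file.md
--     """
--     result = {
--         "card_id": "",
--         "title": "",
--         "quality": "",
--         "output_path": None,
--         "message": None,
--     }
--
--     for line in output.splitlines():
--         if line.startswith("Card ID:"):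
--             result["card_id"] = line.split(":", 1)[1].strip()
--         elif line.startswith("Title:"):
--             result["title"] = line.split(":", 1)[1].strip()
--         elif line.startswith("Quality:"):
--             result["quality"] = line.split(":", 1)[1].strip()
--         elif line.startswith("JSON:"):
--             result["output_path"] = line.split(":", 1)[1].strip()
--
--     return result
-- ===== SOURCE B (Python) =====
-- FIELDS = (
--     ("Card ID:", "card_id"),
--     ("Title:", "title"),
--     ("Quality:", "quality"),
--     ("JSON:", "output_path"),
-- )
--
--
-- def parse_cli_output(output: str):
--     lines = output.splitlines()
--     result = {
--         "card_id": "",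
--         "title": "",
--         "quality": "",
--         "output_path": None,
--         "message": None,
--     }
--     for prefix, key in FIELDS:
--         for line in reversed(lines):
--             if line.startswith(prefix):
--                 result[key] = line[len(prefix):].strip()
--                 break
--     return result
-- ===== Notes on version B (the rewrite author's own statement) =====
-- stated objective: alternative
-- what changed: Instead of one forward pass dispatching each line through a startswith if/elif chain and re-splitting it at the first colon, B does four staged searches: for each field it scans the lines in reverse for the last matching line and slices the value off after the known prefix length (no split at all).
import Mathlib
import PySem

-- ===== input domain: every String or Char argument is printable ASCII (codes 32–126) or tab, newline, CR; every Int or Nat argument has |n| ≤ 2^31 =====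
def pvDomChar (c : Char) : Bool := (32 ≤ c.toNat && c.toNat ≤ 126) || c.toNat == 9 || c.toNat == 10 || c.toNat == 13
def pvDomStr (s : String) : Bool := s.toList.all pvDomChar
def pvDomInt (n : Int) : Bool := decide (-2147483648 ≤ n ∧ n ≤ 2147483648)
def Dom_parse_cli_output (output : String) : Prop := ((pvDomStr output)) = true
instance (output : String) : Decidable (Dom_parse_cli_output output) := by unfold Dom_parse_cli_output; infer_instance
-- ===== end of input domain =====

-- B replaces A's single forward pass (startswith if/elif chain plus a split at the first colon) by four staged
-- reverse searches: per field, the last matching line is found and the value sliced off after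
-- the prefix (alternative decomposition, same cost).


-- ===== PORT A =====
-- line.split(":", 1)[1] — the [1] default "" is unreachable: every branch guard
-- ensures a ':' is in the line, so the split has two parts.
def pvAfterColonA (line : String) : String :=
  ((PySem.Str.splitMax? line ":" 1).getD []).getD 1 ""

def parse_cli_output (output : String) : List (String × Option String) :=
  let init : PySem.Dict String (Option String) :=
    (((((PySem.Dict.empty).insert "card_id" (some "")).insert "title" (some "")).insert
        "quality" (some "")).insert "output_path" none).insert "message" none
  ((PySem.Str.splitlines output).foldl (fun d line =>
      if PySem.Str.startswith line "Card ID:" then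
        d.insert "card_id" (some (PySem.Str.strip (pvAfterColonA line)))
      else if PySem.Str.startswith line "Title:" then
        d.insert "title" (some (PySem.Str.strip (pvAfterColonA line)))
      else if PySem.Str.startswith line "Quality:" then
        d.insert "quality" (some (PySem.Str.strip (pvAfterColonA line)))
      else if PySem.Str.startswith line "JSON:" then
        d.insert "output_path" (some (PySem.Str.strip (pvAfterColonA line)))
      else d) init).items

-- ===== PORT B =====
def pvFields : List (String × String) :=
  [("Card ID:", "card_id"), ("Title:", "title"), ("Quality:", "quality"), ("JSON:", "output_path")]

-- per field: scan reversed(lines) for the first match ('for … break' = find?),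
-- value = line[len(prefix):].strip()
def parse_cli_output_alt (output : String) : List (String × Option String) :=
  let lines := PySem.Str.splitlines output
  let init : PySem.Dict String (Option String) :=
    (((((PySem.Dict.empty).insert "card_id" (some "")).insert "title" (some "")).insert
        "quality" (some "")).insert "output_path" none).insert "message" none
  (pvFields.foldl (fun d pk =>
      match (lines.reverse).find? (fun line => PySem.Str.startswith line pk.1) with
      | some line =>
          d.insert pk.2 (some (PySem.Str.strip (PySem.Str.slice line (some (PySem.Str.len pk.1)) none)))
      | none => d) init).items

-- ===== PRECONDITION & SPEC =====
def Spec_parse_cli_output (output : String) (out : List (String × Option String)) : Prop := out = parse_cli_output_alt output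
instance (output : String) (out : List (String × Option String)) : Decidable (Spec_parse_cli_output output out) := by unfold Spec_parse_cli_output; infer_instance

-- ===== CLAIM (what is proved, stated in full; the proofs are below) =====
def Claim_equal_parse_cli_output : Prop := ∀ (output : String), Dom_parse_cli_output output → Spec_parse_cli_output output (parse_cli_output output)

-- ===== LEMMAS AND PROOFS =====

-- the states both loops drive: the five fixed keys with symbolic values
def pvMk (a b c q : Option String) : PySem.Dict String (Option String) :=
  PySem.Dict.mk [("card_id", a), ("title", b), ("quality", c), ("output_path", q), ("message", none)]

def pvVal (p line : String) : Option String :=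
  some (PySem.Str.strip (PySem.Str.slice line (some (PySem.Str.len p)) none))

-- value of a field after processing `lines`, starting from v: last matching line wins
def pvLast (lines : List String) (p : String) (v : Option String) : Option String :=
  match (lines.reverse).find? (fun line => PySem.Str.startswith line p) with
  | some line => pvVal p line
  | none => v

theorem pvLast_nil (p : String) (v : Option String) : pvLast [] p v = v := rfl

theorem pvLast_cons (x : List String) (l : String) (p : String) (v : Option String) :
    pvLast (l :: x) p v =
      pvLast x p (if PySem.Str.startswith l p then pvVal p l else v) := by
  unfold pvLast
  rw [List.reverse_cons, List.find?_append]
  cases h : (x.reverse).find? (fun line => PySem.Str.startswith line p) with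
  | some line => simp
  | none =>
    simp only [Option.none_or, List.find?_singleton]
    by_cases hs : PySem.Chars.startswith l.toList p.toList = true <;> simp [hs]

-- split the list at the first ':' (proof-side characterisation of split(":", 1))
def pvColonSplit : List Char → List Char × Option (List Char)
  | [] => ([], none)
  | c :: rest =>
    if c = ':' then ([], some rest)
    else
      let p := pvColonSplit rest
      (c :: p.1, p.2)

theorem pv_go_zero (fuel : Nat) (l cur : List Char) (acc : List (List Char)) (h : 1 ≤ fuel) :
    PySem.Chars.splitOnMax.go [':'] fuel 0 l cur acc = ((cur.reverse ++ l) :: acc).reverse := by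
  cases fuel with
  | zero => omega
  | succ f => cases l <;> simp [PySem.Chars.splitOnMax.go]

theorem pv_go_one (l : List Char) : ∀ (fuel : Nat) (cur : List Char) (acc : List (List Char)),
    l.length + 1 ≤ fuel →
    PySem.Chars.splitOnMax.go [':'] fuel 1 l cur acc =
      (match pvColonSplit l with
       | (a, none) => ((cur.reverse ++ a) :: acc).reverse
       | (a, some b) => (b :: (cur.reverse ++ a) :: acc).reverse) := by
  induction l with
  | nil =>
    intro fuel cur acc h
    cases fuel with
    | zero => omega
    | succ f => simp [PySem.Chars.splitOnMax.go, pvColonSplit]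
  | cons c rest ih =>
    intro fuel cur acc h
    cases fuel with
    | zero => simp at h
    | succ f =>
      by_cases hc : c = ':'
      · subst hc
        simp only [PySem.Chars.splitOnMax.go, pvColonSplit]
        rw [if_neg (by omega), if_pos (by simp [List.isPrefixOf])]
        simpa using pv_go_zero f rest [] (cur.reverse :: acc) (by simp at h; omega)
      · simp only [PySem.Chars.splitOnMax.go]
        rw [if_neg (by omega), if_neg (by simp [List.isPrefixOf]; exact fun h => hc h.symm)]
        rw [ih f (c :: cur) acc (by simp at h ⊢; omega)]
        simp only [pvColonSplit, if_neg hc]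
        rcases hp : pvColonSplit rest with ⟨a, ob⟩
        cases ob <;> simp

theorem pv_splitOnMax_colon (l : List Char) :
    PySem.Chars.splitOnMax l [':'] 1 =
      (match pvColonSplit l with
       | (a, none) => [a]
       | (a, some b) => [a, b]) := by
  unfold PySem.Chars.splitOnMax
  rw [if_neg (by omega)]
  rw [show (1:Int).toNat = 1 from rfl]
  rw [pv_go_one l (l.length + 1) [] [] (by omega)]
  rcases hp : pvColonSplit l with ⟨a, ob⟩
  cases ob <;> simp

theorem pvColonSplit_append (pre rest : List Char) (h : ':' ∉ pre) :
    pvColonSplit (pre ++ ':' :: rest) = (pre, some rest) := by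
  induction pre with
  | nil => simp [pvColonSplit]
  | cons c cs ih =>
    have hc : c ≠ ':' := fun hh => h (hh ▸ List.mem_cons_self)
    have hcs : ':' ∉ cs := fun hh => h (List.mem_cons_of_mem _ hh)
    simp [pvColonSplit, hc, ih hcs]

-- A's stripped value equals B's stripped value on a matching line
theorem pv_value_eq (line p : String) (lab : List Char) (hp : p.toList = lab ++ [':'])
    (hlab : ':' ∉ lab) (hsw : PySem.Str.startswith line p = true) :
    some (PySem.Str.strip (pvAfterColonA line)) = pvVal p line := by
  have hpre : p.toList <+: line.toList := by
    have := PySem.Chars.startswith_iff (s := line.toList) (p := p.toList)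
    simpa [PySem.Str.startswith] using this.mp (by simpa [PySem.Str.startswith] using hsw)
  obtain ⟨rest, hrest⟩ := hpre
  rw [hp] at hrest
  have hline : line.toList = lab ++ ':' :: rest := by simpa using hrest.symm
  have hsplit : PySem.Str.splitMax? line ":" 1 =
      some ((PySem.Chars.splitOnMax line.toList [':'] 1).map String.ofList) := by
    simp [PySem.Str.splitMax?, PySem.Chars.splitMax?]
  have hcs : pvColonSplit line.toList = (lab, some rest) := by
    rw [hline]; exact pvColonSplit_append lab rest hlab
  have hA : pvAfterColonA line = String.ofList rest := by
    simp [pvAfterColonA, hsplit, pv_splitOnMax_colon, hcs]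
  have hlenp : PySem.Str.len p = ((lab.length + 1 : Nat) : Int) := by
    simp [PySem.Str.len_eq, ← PySem.Chars.len_eq, hp]
  have hB : (PySem.Str.slice line (some (PySem.Str.len p)) none).toList = rest := by
    rw [hlenp]
    rw [show (PySem.Str.slice line (some ((lab.length + 1 : Nat) : Int)) none).toList =
        PySem.List.slice line.toList (some ((lab.length + 1 : Nat) : Int)) none from by simp]
    rw [PySem.List.slice_from_natCast, hline,
      show lab ++ ':' :: rest = (lab ++ [':']) ++ rest from by simp,
      show lab.length + 1 = (lab ++ [':']).length from by simp, List.drop_left]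
  have hAB : pvAfterColonA line = PySem.Str.slice line (some (PySem.Str.len p)) none := by
    rw [hA, ← hB, String.ofList_toList]
  unfold pvVal
  rw [hAB]

-- no line matches two of the four prefixes
theorem pv_sw_excl (line p q : String) (h1 : PySem.Str.startswith line p = true)
    (hnp : ¬ (p.toList <+: q.toList)) (hnq : ¬ (q.toList <+: p.toList)) :
    PySem.Str.startswith line q = false := by
  by_contra h
  have h2 : PySem.Str.startswith line q = true := by
    cases hq : PySem.Str.startswith line q with
    | false => exact absurd hq h
    | true => rfl
  have hp : p.toList <+: line.toList := by
    have := PySem.Chars.startswith_iff (s := line.toList) (p := p.toList)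
    simpa [PySem.Str.startswith] using this.mp (by simpa [PySem.Str.startswith] using h1)
  have hq : q.toList <+: line.toList := by
    have := PySem.Chars.startswith_iff (s := line.toList) (p := q.toList)
    simpa [PySem.Str.startswith] using this.mp (by simpa [PySem.Str.startswith] using h2)
  rcases List.prefix_or_prefix_of_prefix hp hq with h | h
  · exact hnp h
  · exact hnq h

-- A's loop, characterised field by field
theorem pv_A_foldl (lines : List String) : ∀ (a b c q : Option String),
    lines.foldl (fun d line =>
      if PySem.Str.startswith line "Card ID:" then
        d.insert "card_id" (some (PySem.Str.strip (pvAfterColonA line)))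
      else if PySem.Str.startswith line "Title:" then
        d.insert "title" (some (PySem.Str.strip (pvAfterColonA line)))
      else if PySem.Str.startswith line "Quality:" then
        d.insert "quality" (some (PySem.Str.strip (pvAfterColonA line)))
      else if PySem.Str.startswith line "JSON:" then
        d.insert "output_path" (some (PySem.Str.strip (pvAfterColonA line)))
      else d) (pvMk a b c q) =
      pvMk (pvLast lines "Card ID:" a) (pvLast lines "Title:" b)
           (pvLast lines "Quality:" c) (pvLast lines "JSON:" q) := by
  induction lines with
  | nil => intro a b c q; simp [pvLast_nil]
  | cons l rest ih =>
    intro a b c q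
    rw [List.foldl_cons, pvLast_cons, pvLast_cons, pvLast_cons, pvLast_cons]
    by_cases h1 : PySem.Str.startswith l "Card ID:" = true
    · have e2 := pv_sw_excl l "Card ID:" "Title:" h1 (by decide) (by decide)
      have e3 := pv_sw_excl l "Card ID:" "Quality:" h1 (by decide) (by decide)
      have e4 := pv_sw_excl l "Card ID:" "JSON:" h1 (by decide) (by decide)
      have hv := pv_value_eq l "Card ID:" ("Card ID").toList (by decide) (by decide) h1
      rw [if_pos h1, show (pvMk a b c q).insert "card_id"
            (some (PySem.Str.strip (pvAfterColonA l))) =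
          pvMk (some (PySem.Str.strip (pvAfterColonA l))) b c q from rfl, ih]
      rw [h1, e2, e3, e4]
      simp [hv]
    · rw [if_neg h1]
      have h1' : PySem.Str.startswith l "Card ID:" = false := by
        cases h : PySem.Str.startswith l "Card ID:" with
        | false => rfl | true => exact absurd h h1
      by_cases h2 : PySem.Str.startswith l "Title:" = true
      · have e3 := pv_sw_excl l "Title:" "Quality:" h2 (by decide) (by decide)
        have e4 := pv_sw_excl l "Title:" "JSON:" h2 (by decide) (by decide)
        have hv := pv_value_eq l "Title:" ("Title").toList (by decide) (by decide) h2
        rw [if_pos h2, show (pvMk a b c q).insert "title"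
              (some (PySem.Str.strip (pvAfterColonA l))) =
            pvMk a (some (PySem.Str.strip (pvAfterColonA l))) c q from rfl, ih]
        rw [h1', h2, e3, e4]
        simp [hv]
      · rw [if_neg h2]
        have h2' : PySem.Str.startswith l "Title:" = false := by
          cases h : PySem.Str.startswith l "Title:" with
          | false => rfl | true => exact absurd h h2
        by_cases h3 : PySem.Str.startswith l "Quality:" = true
        · have e4 := pv_sw_excl l "Quality:" "JSON:" h3 (by decide) (by decide)
          have hv := pv_value_eq l "Quality:" ("Quality").toList (by decide) (by decide) h3
          rw [if_pos h3, show (pvMk a b c q).insert "quality"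
                (some (PySem.Str.strip (pvAfterColonA l))) =
              pvMk a b (some (PySem.Str.strip (pvAfterColonA l))) q from rfl, ih]
          rw [h1', h2', h3, e4]
          simp [hv]
        · rw [if_neg h3]
          have h3' : PySem.Str.startswith l "Quality:" = false := by
            cases h : PySem.Str.startswith l "Quality:" with
            | false => rfl | true => exact absurd h h3
          by_cases h4 : PySem.Str.startswith l "JSON:" = true
          · have hv := pv_value_eq l "JSON:" ("JSON").toList (by decide) (by decide) h4
            rw [if_pos h4, show (pvMk a b c q).insert "output_path"
                  (some (PySem.Str.strip (pvAfterColonA l))) =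
                pvMk a b c (some (PySem.Str.strip (pvAfterColonA l))) from rfl, ih]
            rw [h1', h2', h3', h4]
            simp [hv]
          · have h4' : PySem.Str.startswith l "JSON:" = false := by
              cases h : PySem.Str.startswith l "JSON:" with
              | false => rfl | true => exact absurd h h4
            rw [if_neg h4, ih]
            rw [h1', h2', h3', h4']
            simp

-- B's loop evaluates to the same field-by-field characterisation
theorem pv_B_foldl (lines : List String) (a b c q : Option String) :
    pvFields.foldl (fun d pk =>
      match (lines.reverse).find? (fun line => PySem.Str.startswith line pk.1) with
      | some line =>
          d.insert pk.2 (some (PySem.Str.strip (PySem.Str.slice line (some (PySem.Str.len pk.1)) none)))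
      | none => d) (pvMk a b c q) =
      pvMk (pvLast lines "Card ID:" a) (pvLast lines "Title:" b)
           (pvLast lines "Quality:" c) (pvLast lines "JSON:" q) := by
  unfold pvFields pvLast pvVal
  simp only [List.foldl_cons, List.foldl_nil]
  cases hf1 : (lines.reverse).find? (fun line => PySem.Str.startswith line "Card ID:") <;>
    cases hf2 : (lines.reverse).find? (fun line => PySem.Str.startswith line "Title:") <;>
      cases hf3 : (lines.reverse).find? (fun line => PySem.Str.startswith line "Quality:") <;>
        cases hf4 : (lines.reverse).find? (fun line => PySem.Str.startswith line "JSON:") <;>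
          rfl

-- ===== VERDICT (by name: the statement is the Claim_ definition above) =====
theorem parse_cli_output_spec : Claim_equal_parse_cli_output := by
  intro output _
  unfold Spec_parse_cli_output parse_cli_output parse_cli_output_alt
  show (((PySem.Str.splitlines output).foldl _ (pvMk (some "") (some "") (some "") none)).items) =
    ((pvFields.foldl _ (pvMk (some "") (some "") (some "") none)).items)
  rw [pv_A_foldl, pv_B_foldl]
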